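-- pv_equiv track=rewrite | github.com/PedroAdlerPadula/ep2-pedropgabrielc | funcoes.py | calcula_pontos_quina
-- ===== SOURCE A (Python) =====
-- def calcula_pontos_quina(lista_valores):
--     dicio = {}
--     for i in lista_valores:
--         if i in dicio:
--             dicio[i] += 1
--         else:
--             dicio[i] = 1
--
--     for k in dicio.values():
--         if k >= 5:
--             return 50
--     else:
--         return 0
-- ===== SOURCE B (Python) =====
-- def calcula_pontos_quina(lista_valores):
--     return 50 if any(lista_valores.count(x) >= 5 for x in lista_valores) else 0
-- ===== Notes on version B (the rewrite author's own statement) =====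
-- stated objective: simpler
-- what changed: Replaced the hash-counter build plus a second pass over the dict values by a single any() over the list that counts each element's occurrences directly.
import Mathlib
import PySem

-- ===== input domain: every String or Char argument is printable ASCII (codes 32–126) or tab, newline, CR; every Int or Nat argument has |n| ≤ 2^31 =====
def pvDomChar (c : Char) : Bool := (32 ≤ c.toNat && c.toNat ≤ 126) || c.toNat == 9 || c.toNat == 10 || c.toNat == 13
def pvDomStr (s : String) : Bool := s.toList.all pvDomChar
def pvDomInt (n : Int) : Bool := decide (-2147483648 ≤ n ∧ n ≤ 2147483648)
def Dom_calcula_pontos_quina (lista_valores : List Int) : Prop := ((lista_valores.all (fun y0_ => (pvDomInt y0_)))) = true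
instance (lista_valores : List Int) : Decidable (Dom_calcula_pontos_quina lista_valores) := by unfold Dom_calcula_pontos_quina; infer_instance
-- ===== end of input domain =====

-- B replaces the hash-counter build plus a second pass over its values by a single
-- any() over the list that counts each element directly (simpler; not faster).

-- ===== PORT A =====
-- the second loop of A: scan dict values, return 50 at the first one ≥ 5, else 0
def pvQuinaScan : List Int → Int
  | [] => 0
  | k :: t => if k ≥ 5 then 50 else pvQuinaScan t

def calcula_pontos_quina (lista_valores : List Int) : Int :=
  let dicio : PySem.Dict Int Int :=
    lista_valores.foldl
      (fun d i => if d.contains i then d.insert i (d.getD i 0 + 1) else d.insert i 1)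
      PySem.Dict.empty
  pvQuinaScan dicio.values

-- ===== PORT B =====
def calcula_pontos_quina_alt (lista_valores : List Int) : Int :=
  if lista_valores.any (fun x => decide (5 ≤ lista_valores.count x)) then 50 else 0

-- ===== PRECONDITION & SPEC =====
def Spec_calcula_pontos_quina (lista_valores : List Int) (out : Int) : Prop := out = calcula_pontos_quina_alt lista_valores
instance (lista_valores : List Int) (out : Int) : Decidable (Spec_calcula_pontos_quina lista_valores out) := by unfold Spec_calcula_pontos_quina; infer_instance

-- ===== CLAIM (what is proved, stated in full; the proofs are below) =====
def Claim_equal_calcula_pontos_quina : Prop := ∀ (lista_valores : List Int), Dom_calcula_pontos_quina lista_valores → Spec_calcula_pontos_quina lista_valores (calcula_pontos_quina lista_valores)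

-- ===== LEMMAS AND PROOFS =====

theorem pvGetD_zero_of_not_contains (d : PySem.Dict Int Int) (x : Int)
    (h : d.contains x = false) : d.getD x 0 = 0 := by
  have h' : ∀ p ∈ d.items, ¬ (p.1 == x) = true := by
    simpa [PySem.Dict.contains, List.any_eq_false] using h
  simp [PySem.Dict.getD, PySem.Dict.get?, List.find?_eq_none.mpr h']

-- A's counting loop builds exactly Counter(lista_valores)
theorem pvFoldA_eq_counter (l : List Int) :
    l.foldl (fun d i => if d.contains i then d.insert i (d.getD i 0 + 1) else d.insert i 1)
      PySem.Dict.empty = PySem.Dict.counter l := by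
  rw [← PySem.Dict.foldl_insert_getD_add_one_eq_counter]
  suffices h : ∀ d : PySem.Dict Int Int,
      l.foldl (fun d i => if d.contains i then d.insert i (d.getD i 0 + 1) else d.insert i 1) d
        = l.foldl (fun d x => d.insert x (d.getD x 0 + 1)) d from h _
  induction l with
  | nil => intro d; rfl
  | cons x t ih =>
    intro d
    simp only [List.foldl_cons]
    by_cases hc : d.contains x = true
    · rw [if_pos hc]; exact ih _
    · rw [if_neg hc, pvGetD_zero_of_not_contains d x (by simpa using hc)]
      exact ih _

-- A's value scan is 'any value ≥ 5'
theorem pvQuinaScan_eq_any (vs : List Int) :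
    pvQuinaScan vs = if vs.any (fun k => decide (5 ≤ k)) then 50 else 0 := by
  induction vs with
  | nil => rfl
  | cons k t ih =>
    simp only [pvQuinaScan, List.any_cons, ge_iff_le]
    by_cases h : 5 ≤ k
    · simp [h]
    · simp [h, ih]

-- ===== VERDICT (by name: the statement is the Claim_ definition above) =====
theorem calcula_pontos_quina_spec : Claim_equal_calcula_pontos_quina := by
  intro l _
  show calcula_pontos_quina l = calcula_pontos_quina_alt l
  unfold calcula_pontos_quina calcula_pontos_quina_alt
  rw [pvFoldA_eq_counter, pvQuinaScan_eq_any]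
  have hvals : (PySem.Dict.counter l).values
      = (PySem.Set.ofList l).map (fun k => (l.count k : Int)) := by
    simp [PySem.Dict.values, PySem.Dict.items_counter]
  rw [hvals]
  have hany : ((PySem.Set.ofList l).map (fun k => (l.count k : Int))).any (fun k => decide (5 ≤ k))
      = l.any (fun x => decide (5 ≤ l.count x)) := by
    rw [List.any_map, Bool.eq_iff_iff]
    simp only [List.any_eq_true, Function.comp_apply, decide_eq_true_eq]
    constructor
    · rintro ⟨k, hk, hle⟩
      exact ⟨k, (PySem.Set.mem_ofList l k).mp hk, by exact_mod_cast hle⟩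
    · rintro ⟨k, hk, hle⟩
      exact ⟨k, (PySem.Set.mem_ofList l k).mpr hk, by exact_mod_cast hle⟩
  rw [hany]
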